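-- pv_equiv track=rewrite | github.com/elikoga/Uni | Compilerbau/2024-05-02/a1a.py | check_ab_string
-- ===== SOURCE A (Python) =====
-- def check_ab_string(s):
--     # for each a: check if index -1, -2 is b
--     for i, c in enumerate(s):
--         if c == 'a':
--             if i < 2:
--                 return False
--             if s[i-1] != 'b' or s[i-2] != 'b':
--                 return False
--     return True
-- ===== SOURCE B (Python) =====
-- def check_ab_string(s):
--     # One pass with a running count of consecutive 'b's seen just before the
--     # current character; an 'a' is valid iff that run is at least 2.
--     bb = 0
--     for c in s:
--         if c == 'a' and bb < 2:
--             return False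
--         bb = bb + 1 if c == 'b' else 0
--     return True
-- ===== Notes on version B (the rewrite author's own statement) =====
-- stated objective: alternative
-- what changed: Replaces A's enumerate loop that looks back into the string with s[i-1]/s[i-2] by a single forward pass carrying a counter of consecutive preceding 'b's, so no indexing into the string is needed.
import Mathlib
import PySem

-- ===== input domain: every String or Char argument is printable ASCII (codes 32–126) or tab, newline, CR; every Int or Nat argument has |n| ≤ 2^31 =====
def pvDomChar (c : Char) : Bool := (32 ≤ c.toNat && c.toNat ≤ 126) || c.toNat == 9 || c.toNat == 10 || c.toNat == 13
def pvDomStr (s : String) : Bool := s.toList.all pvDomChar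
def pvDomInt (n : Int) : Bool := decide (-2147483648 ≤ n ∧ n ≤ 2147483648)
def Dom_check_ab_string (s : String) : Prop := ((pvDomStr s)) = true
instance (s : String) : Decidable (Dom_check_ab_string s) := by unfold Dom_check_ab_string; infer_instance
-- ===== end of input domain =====

-- B replaces A's look-back indexing (s[i-1]/s[i-2]) by a one-pass counter of consecutive preceding 'b's; alternative decomposition, same cost.


-- ===== PORT A =====
-- the enumerate loop: rest = remaining characters, i = current index, l = the whole string
def checkAbLoopA (l : List Char) : List Char → Int → Bool
  | [], _ => true
  | c :: rest, i =>
    if c = 'a' then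
      if i < 2 then false
      else if ¬ (PySem.List.pyGet? l (i - 1) = some 'b') ∨ ¬ (PySem.List.pyGet? l (i - 2) = some 'b') then false
      else checkAbLoopA l rest (i + 1)
    else checkAbLoopA l rest (i + 1)

def check_ab_string (s : String) : Bool :=
  checkAbLoopA s.toList s.toList 0

-- ===== PORT B =====
-- bb = number of consecutive 'b's ending just before the current character
def checkAbLoopB : List Char → Int → Bool
  | [], _ => true
  | c :: rest, bb =>
    if c = 'a' ∧ bb < 2 then false
    else checkAbLoopB rest (if c = 'b' then bb + 1 else 0)

def check_ab_string_alt (s : String) : Bool :=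
  checkAbLoopB s.toList 0

-- ===== PRECONDITION & SPEC =====
def Spec_check_ab_string (s : String) (out : Bool) : Prop := out = check_ab_string_alt s
instance (s : String) (out : Bool) : Decidable (Spec_check_ab_string s out) := by unfold Spec_check_ab_string; infer_instance

-- ===== CLAIM (what is proved, stated in full; the proofs are below) =====
def Claim_equal_check_ab_string : Prop := ∀ (s : String), Dom_check_ab_string s → Spec_check_ab_string s (check_ab_string s)

-- ===== LEMMAS AND PROOFS =====

-- the character k back from the current position is pre[k] (pre = reversed prefix)
theorem pyGet_rev_prefix (pre rest : List Char) (k : Nat) (hk : k < pre.length) :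
    PySem.List.pyGet? (pre.reverse ++ rest) ((pre.length : Int) - 1 - (k : Int)) = pre[k]? := by
  have h : ((pre.length : Int) - 1 - (k : Int)) = ((pre.length - 1 - k : Nat) : Int) := by omega
  rw [h, PySem.List.pyGet?_natCast,
      List.getElem?_append_left (by simp only [List.length_reverse]; omega),
      List.getElem?_reverse (by omega)]
  congr 1
  omega

-- loop invariant: bb ≥ 1 / bb ≥ 2 say whether the last one / two characters of the prefix are 'b'
theorem key (rest : List Char) : ∀ (pre : List Char) (bb : Int),
    0 ≤ bb →
    ((1 ≤ bb) ↔ pre[0]? = some 'b') →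
    ((2 ≤ bb) ↔ (pre[0]? = some 'b' ∧ pre[1]? = some 'b')) →
    checkAbLoopA (pre.reverse ++ rest) rest (pre.length : Int) = checkAbLoopB rest bb := by
  induction rest with
  | nil => intro pre bb _ _ _; rfl
  | cons c rest ih =>
    intro pre bb h0 h1 h2
    have hassoc : (c :: pre).reverse ++ rest = pre.reverse ++ c :: rest := by simp
    have hlen : ((c :: pre).length : Int) = (pre.length : Int) + 1 := by
      simp only [List.length_cons]; push_cast; ring
    have e1 : 1 ≤ pre.length →
        PySem.List.pyGet? (pre.reverse ++ c :: rest) ((pre.length : Int) - 1) = pre[0]? := by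
      intro h; simpa using pyGet_rev_prefix pre (c :: rest) 0 (by omega)
    have e2 : 2 ≤ pre.length →
        PySem.List.pyGet? (pre.reverse ++ c :: rest) ((pre.length : Int) - 2) = pre[1]? := by
      intro h
      have hg := pyGet_rev_prefix pre (c :: rest) 1 (by omega)
      rw [show ((pre.length : Int) - 1 - ((1 : Nat) : Int)) = (pre.length : Int) - 2 by
        push_cast; ring] at hg
      exact hg
    simp only [checkAbLoopA, checkAbLoopB]
    by_cases hc : c = 'a'
    · by_cases hbb : bb < 2
      · rw [if_pos (show c = 'a' ∧ bb < 2 from ⟨hc, hbb⟩), if_pos hc]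
        by_cases hl : 2 ≤ pre.length
        · have hcond : ¬ (PySem.List.pyGet? (pre.reverse ++ c :: rest) ((pre.length : Int) - 1) = some 'b') ∨
              ¬ (PySem.List.pyGet? (pre.reverse ++ c :: rest) ((pre.length : Int) - 2) = some 'b') := by
            rw [e1 (by omega), e2 hl]
            by_contra hcon
            push Not at hcon
            exact absurd (h2.mpr ⟨hcon.1, hcon.2⟩) (by omega)
          rw [if_neg (show ¬ ((pre.length : Int) < 2) by
                have : (2 : Int) ≤ (pre.length : Int) := by exact_mod_cast hl
                omega),
              if_pos hcond]
        · rw [if_pos (show (pre.length : Int) < 2 by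
            have : (pre.length : Int) < 2 := by exact_mod_cast not_le.mp hl
            exact this)]
      · have hb2 := h2.mp (by omega)
        have hlen2 : 2 ≤ pre.length := by
          obtain ⟨hlt, -⟩ := List.getElem?_eq_some_iff.mp hb2.2
          omega
        rw [if_pos hc, if_neg (show ¬ (c = 'a' ∧ bb < 2) from fun h => hbb h.2)]
        rw [if_neg (show ¬ ((pre.length : Int) < 2) by
              have : (2 : Int) ≤ (pre.length : Int) := by exact_mod_cast hlen2
              omega)]
        rw [if_neg (by rw [e1 (by omega), e2 hlen2]; push Not; exact ⟨hb2.1, hb2.2⟩)]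
        rw [if_neg (show ¬ c = 'b' by rw [hc]; decide)]
        have h := ih (c :: pre) 0 le_rfl
          (by simp [hc]) (by simp [hc])
        rw [hassoc, hlen] at h
        exact h
    · rw [if_neg hc, if_neg (show ¬ (c = 'a' ∧ bb < 2) from fun h => hc h.1)]
      by_cases hcb : c = 'b'
      · rw [if_pos hcb]
        have h := ih (c :: pre) (bb + 1) (by omega)
          (by simp [hcb]; omega)
          (by simp only [List.getElem?_cons_zero, List.getElem?_cons_succ]
              rw [show ((2 : Int) ≤ bb + 1) ↔ (1 ≤ bb) from by omega, h1]
              simp [hcb])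
        rw [hassoc, hlen] at h
        exact h
      · rw [if_neg hcb]
        have h := ih (c :: pre) 0 le_rfl
          (by simp [hcb]) (by simp [hcb])
        rw [hassoc, hlen] at h
        exact h

-- ===== VERDICT (by name: the statement is the Claim_ definition above) =====
theorem check_ab_string_spec : Claim_equal_check_ab_string := by
  intro s _
  unfold Spec_check_ab_string check_ab_string check_ab_string_alt
  simpa using key s.toList [] 0 le_rfl (by decide) (by decide)
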